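-- pv_equiv track=rewrite | github.com/zhiqi-zhang233/CareerCat | careercat-backend/app/services/resume_parser_service.py | _normalize_project_list
-- ===== SOURCE A (Python) =====
-- from typing import Dict, List
--
-- def _normalize_project_list(items: List[Dict]) -> List[Dict]:
--     normalized = []
--     for item in items or []:
--         normalized.append(
--             {
--                 "project_name": (item.get("project_name") or "").strip(),
--                 "project_role": (item.get("project_role") or "").strip(),
--                 "start_date": (item.get("start_date") or "").strip(),
--                 "end_date": (item.get("end_date") or "").strip(),
--                 "details": (item.get("details") or "").strip(),
--             }
--         )
--     return normalized
-- ===== SOURCE B (Python) =====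
-- from typing import Dict, List
--
-- _FIELDS = ["project_name", "project_role", "start_date", "end_date", "details"]
--
-- def _normalize_project_list(items: List[Dict]) -> List[Dict]:
--     # Column-wise: one full pass per field producing that field's stripped column,
--     # then transpose the columns back into per-item records.
--     rows = items or []
--     columns = [[(item.get(k) or "").strip() for item in rows] for k in _FIELDS]
--     return [dict(zip(_FIELDS, values)) for values in zip(*columns)]
-- ===== Notes on version B (the rewrite author's own statement) =====
-- stated objective: alternative
-- what changed: B normalizes column-wise: it makes one pass per field to build five stripped columns, then transposes (zips) the columns into the per-item records, instead of A's single row-wise loop assembling each record's five keys.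
import Mathlib
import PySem

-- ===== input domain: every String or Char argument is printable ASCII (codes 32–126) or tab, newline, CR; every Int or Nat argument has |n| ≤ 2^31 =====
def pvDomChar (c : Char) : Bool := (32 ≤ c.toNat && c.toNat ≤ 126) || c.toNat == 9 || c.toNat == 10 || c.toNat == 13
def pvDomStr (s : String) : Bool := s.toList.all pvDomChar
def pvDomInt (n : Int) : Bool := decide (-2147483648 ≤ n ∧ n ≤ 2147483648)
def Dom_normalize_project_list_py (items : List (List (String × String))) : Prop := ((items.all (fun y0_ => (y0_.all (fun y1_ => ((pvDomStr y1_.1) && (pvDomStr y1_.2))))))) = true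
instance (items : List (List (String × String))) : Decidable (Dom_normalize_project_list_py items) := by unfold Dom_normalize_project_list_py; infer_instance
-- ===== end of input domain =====

-- B normalizes column-wise (one pass per field building that field's stripped
-- column, then transposing the columns into records) instead of A's row-wise loop.

-- ===== PORT A =====
-- `item.get(k) or ""`: None → "", and a falsy (empty) string also → ""
def pyOrEmpty (o : Option String) : String :=
  match o with
  | none => ""
  | some s => if s == "" then "" else s

def normalize_project_list_py (items : List (List (String × String))) : List (List (String × String)) :=
  items.foldl (fun normalized item =>
    normalized ++ [[
      ("project_name", PySem.Str.strip (pyOrEmpty (item.lookup "project_name"))),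
      ("project_role", PySem.Str.strip (pyOrEmpty (item.lookup "project_role"))),
      ("start_date", PySem.Str.strip (pyOrEmpty (item.lookup "start_date"))),
      ("end_date", PySem.Str.strip (pyOrEmpty (item.lookup "end_date"))),
      ("details", PySem.Str.strip (pyOrEmpty (item.lookup "details")))
    ]]) []

-- ===== PORT B =====
-- one column: the stripped values of field k across all items (Source B's inner comprehension)
def pvColumn (k : String) (items : List (List (String × String))) : List String :=
  items.map (fun item => PySem.Str.strip ((item.lookup k).getD ""))

-- Source B's zip(*columns) + dict(zip(_FIELDS, values)), with the five fields fixed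
def pvZip5 : List String → List String → List String → List String → List String → List (List (String × String))
  | a :: as, b :: bs, c :: cs, d :: ds, e :: es =>
      [("project_name", a), ("project_role", b), ("start_date", c),
       ("end_date", d), ("details", e)] :: pvZip5 as bs cs ds es
  | _, _, _, _, _ => []

def normalize_project_list_py_alt (items : List (List (String × String))) : List (List (String × String)) :=
  pvZip5 (pvColumn "project_name" items) (pvColumn "project_role" items)
         (pvColumn "start_date" items) (pvColumn "end_date" items)
         (pvColumn "details" items)

-- ===== PRECONDITION & SPEC =====
def Spec_normalize_project_list_py (items : List (List (String × String))) (out : List (List (String × String))) : Prop := out = normalize_project_list_py_alt items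
instance (items : List (List (String × String))) (out : List (List (String × String))) : Decidable (Spec_normalize_project_list_py items out) := by unfold Spec_normalize_project_list_py; infer_instance

-- ===== CLAIM (what is proved, stated in full; the proofs are below) =====
def Claim_equal_normalize_project_list_py : Prop := ∀ (items : List (List (String × String))), Dom_normalize_project_list_py items → Spec_normalize_project_list_py items (normalize_project_list_py items)

-- ===== LEMMAS AND PROOFS =====
theorem pyOrEmpty_eq_getD (o : Option String) : pyOrEmpty o = o.getD "" := by
  cases o with
  | none => rfl
  | some s =>
    simp only [pyOrEmpty, Option.getD_some]
    split
    · next h => exact (eq_of_beq h).symm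
    · rfl

-- A's accumulator loop appends one record per item: it is the map of the record builder
theorem portA_eq_map (items : List (List (String × String))) :
    normalize_project_list_py items =
      items.map (fun item =>
        [("project_name", PySem.Str.strip ((item.lookup "project_name").getD "")),
         ("project_role", PySem.Str.strip ((item.lookup "project_role").getD "")),
         ("start_date", PySem.Str.strip ((item.lookup "start_date").getD "")),
         ("end_date", PySem.Str.strip ((item.lookup "end_date").getD "")),
         ("details", PySem.Str.strip ((item.lookup "details").getD ""))]) := by
  unfold normalize_project_list_py
  rw [PySem.List.foldl_append_singleton_eq_map]
  simp [pyOrEmpty_eq_getD]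

-- zipping the five columns rebuilds the row-wise map
theorem portB_eq_map (items : List (List (String × String))) :
    normalize_project_list_py_alt items =
      items.map (fun item =>
        [("project_name", PySem.Str.strip ((item.lookup "project_name").getD "")),
         ("project_role", PySem.Str.strip ((item.lookup "project_role").getD "")),
         ("start_date", PySem.Str.strip ((item.lookup "start_date").getD "")),
         ("end_date", PySem.Str.strip ((item.lookup "end_date").getD "")),
         ("details", PySem.Str.strip ((item.lookup "details").getD ""))]) := by
  induction items with
  | nil => rfl
  | cons item rest ih =>
    simpa [normalize_project_list_py_alt, pvColumn, pvZip5, List.map]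
      using ih

-- ===== VERDICT (by name: the statement is the Claim_ definition above) =====
theorem normalize_project_list_py_spec : Claim_equal_normalize_project_list_py := by
  intro items _
  show normalize_project_list_py items = normalize_project_list_py_alt items
  rw [portA_eq_map, portB_eq_map]
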